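-- pv_equiv track=rewrite | github.com/jupyter-jsc/JupyterHub-extended | j4j_spawner/html_dashboard.py | onchange_dd3
-- ===== SOURCE A (Python) =====
-- def onchange_dd3(user_dic, dashboard_filter):
--     ret = ""
--     ret += "function onChangeDD3() {\n"
--     ret += "  var first = $('#firstdd').val();\n"
--     ret += "  var dash = $('#dashboarddd').val();\n"
--     ret += "  var second = $('#seconddd').val();\n"
--     ret += "  var value = $('#thirddd').val();\n"
--     ret += "  $('#third_input').val(value);\n"
--     ret += "  $('#thirddd').html(value + ' <span class=\\\"caret\\\"></span>');\n"
--     for second, rest2 in user_dic.items():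
--         ret += '    if ( second == "'+ second +'" ) {\n'
--         if second == "HDF-Cloud":
--             ret += '      checkboxes_jlab();\n'
--         for third, rest3 in rest2.items():
--             if len(rest3.keys()) > 0:
--                 ret += '      if ( value == "'+ third +'" ) {\n'
--                 ret += '        $("#fourthdd_ul").html("");\n'
--                 for dashboard, v1 in dashboard_filter.items():
--                     for system, v2 in v1.items():
--                         for account, v3 in v2.items():
--                             if len(v3.keys()) > 0:
--                                 ret += '        if ( dash == "'+dashboard+'" && second == "'+system+'" && value == "'+account+'"){\n'
--                                 for project in sorted(v3.keys(), key=lambda s: s.casefold()):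
--                                     ret += '          $("#fourthdd_ul").append(\'<li><a href="#" onclick="{onclick}(\\\'{key}\\\')" id="{div_prefix}_{key}">{key}</a></li>\');\n'.format(onclick="onClickDD4", div_prefix="fourthdd", key=project)
--                                 ret += '          $("#fourthdd").val("{}").trigger("change");\n'.format(sorted(v3.keys(), key=lambda s: s.casefold())[0])
--                                 ret += '        }\n'
--                 ret += "        $('#fourthdd_div').show();\n"
--                 ret += "      }\n"
--         ret += "    }\n"
--     ret += "}\n"
--     return ret
-- ===== SOURCE B (Python) =====
-- def onchange_dd3(user_dic, dashboard_filter):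
--     # Hoist the loop-invariant dashboard_filter block: traverse it ONCE into `inner`,
--     # then each (second, third) branch just splices the precomputed string.
--     parts = []
--     for dashboard, v1 in dashboard_filter.items():
--         for system, v2 in v1.items():
--             for account, v3 in v2.items():
--                 keys = sorted(v3.keys(), key=str.casefold)
--                 if keys:
--                     parts.append('        if ( dash == "' + dashboard + '" && second == "' + system + '" && value == "' + account + '"){\n')
--                     for project in keys:
--                         parts.append('          $("#fourthdd_ul").append(\'<li><a href="#" onclick="onClickDD4(\\\'' + project + '\\\')" id="fourthdd_' + project + '">' + project + '</a></li>\');\n')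
--                     parts.append('          $("#fourthdd").val("' + keys[0] + '").trigger("change");\n')
--                     parts.append('        }\n')
--     inner = ''.join(parts)
--     out = ["function onChangeDD3() {\n",
--            "  var first = $('#firstdd').val();\n",
--            "  var dash = $('#dashboarddd').val();\n",
--            "  var second = $('#seconddd').val();\n",
--            "  var value = $('#thirddd').val();\n",
--            "  $('#third_input').val(value);\n",
--            "  $('#thirddd').html(value + ' <span class=\\\"caret\\\"></span>');\n"]
--     for second, rest2 in user_dic.items():
--         out.append('    if ( second == "' + second + '" ) {\n')
--         if second == "HDF-Cloud":
--             out.append('      checkboxes_jlab();\n')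
--         for third, rest3 in rest2.items():
--             if rest3:
--                 out.append('      if ( value == "' + third + '" ) {\n')
--                 out.append('        $("#fourthdd_ul").html("");\n')
--                 out.append(inner)
--                 out.append("        $('#fourthdd_div').show();\n")
--                 out.append("      }\n")
--         out.append('    }\n')
--     out.append("}\n")
--     return ''.join(out)
-- ===== Notes on version B (the rewrite author's own statement) =====
-- stated objective: faster
-- what changed: B traverses dashboard_filter once, building the loop-invariant inner block (with the casefold-sorted keys computed once) as a joined list of parts, and the user_dic loop merely splices that precomputed string into each branch, instead of A's re-running the full nested dashboard_filter traversal (and sorting twice) inside every (second, third) pair.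
import Mathlib
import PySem

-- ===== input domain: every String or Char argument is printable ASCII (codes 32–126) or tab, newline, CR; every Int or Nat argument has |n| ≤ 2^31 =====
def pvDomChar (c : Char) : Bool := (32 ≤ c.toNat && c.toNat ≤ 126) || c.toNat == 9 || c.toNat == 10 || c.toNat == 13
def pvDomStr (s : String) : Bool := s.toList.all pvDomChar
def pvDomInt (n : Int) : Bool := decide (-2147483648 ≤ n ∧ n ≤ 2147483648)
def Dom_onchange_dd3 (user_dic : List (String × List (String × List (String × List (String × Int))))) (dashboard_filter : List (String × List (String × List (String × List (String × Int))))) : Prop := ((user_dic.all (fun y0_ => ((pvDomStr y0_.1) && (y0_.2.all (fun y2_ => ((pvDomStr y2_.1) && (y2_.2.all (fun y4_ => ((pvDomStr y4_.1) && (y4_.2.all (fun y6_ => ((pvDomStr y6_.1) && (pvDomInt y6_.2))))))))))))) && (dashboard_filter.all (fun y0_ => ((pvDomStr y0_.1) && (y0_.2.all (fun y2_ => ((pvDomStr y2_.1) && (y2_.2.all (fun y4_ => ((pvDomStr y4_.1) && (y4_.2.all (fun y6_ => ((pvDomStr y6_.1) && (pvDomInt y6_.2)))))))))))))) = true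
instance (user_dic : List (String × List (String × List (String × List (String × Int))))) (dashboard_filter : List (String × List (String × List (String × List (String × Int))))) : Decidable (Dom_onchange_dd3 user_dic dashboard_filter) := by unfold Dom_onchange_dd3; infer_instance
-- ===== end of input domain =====

-- B hoists the loop-invariant dashboard_filter block out of the user_dic loops: it is built once
-- and spliced into each branch, instead of re-traversed per (second, third) pair (objective: faster).
-- Python's s.casefold() / str.casefold sort key is ported as PySem.Str.lower, exact on the ASCII domain Dom_onchange_dd3.

-- ===== PORT A =====
-- Each Python for-loop of A becomes one named foldl over the same accumulator `ret`:
-- the `project` loop over sorted(v3.keys(), ...) (sorted is called twice, exactly as A does),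
-- the account / system / dashboard loops over dashboard_filter, the `third` loop, the `second` loop.
def pvA_accLoop (v2 : List (String × List (String × Int))) (dashboard system : String) (ret : String) : String :=
  v2.foldl (fun ret ap =>
    if ap.2.length > 0 then
      let ret := ret ++ ("        if ( dash == \"" ++ dashboard ++ "\" && second == \"" ++ system ++ "\" && value == \"" ++ ap.1 ++ "\"){\n")
      let ret := (PySem.List.sorted (ap.2.map Prod.fst) (fun s => PySem.Str.lower s) false).foldl
        (fun ret project => ret ++ ("          $(\"#fourthdd_ul\").append('<li><a href=\"#\" onclick=\"onClickDD4(\\'" ++ project ++ "\\')\" id=\"fourthdd_" ++ project ++ "\">" ++ project ++ "</a></li>');\n")) ret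
      -- `sorted(...)[0]` under the guard len(v3)>0: the sorted list is nonempty, pyGetD _ 0 "" is exact
      ret ++ ("          $(\"#fourthdd\").val(\"" ++ PySem.List.pyGetD (PySem.List.sorted (ap.2.map Prod.fst) (fun s => PySem.Str.lower s) false) 0 "" ++ "\").trigger(\"change\");\n") ++ "        }\n"
    else ret) ret

def pvA_dfLoop (dashboard_filter : List (String × List (String × List (String × List (String × Int))))) (ret : String) : String :=
  dashboard_filter.foldl (fun ret dp =>
    dp.2.foldl (fun ret sp => pvA_accLoop sp.2 dp.1 sp.1 ret) ret) ret

def pvA_thirdLoop (rest2 : List (String × List (String × List (String × Int)))) (dashboard_filter : List (String × List (String × List (String × List (String × Int))))) (ret : String) : String :=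
  rest2.foldl (fun ret tp =>
    if tp.2.length > 0 then
      let ret := ret ++ ("      if ( value == \"" ++ tp.1 ++ "\" ) {\n")
      let ret := ret ++ "        $(\"#fourthdd_ul\").html(\"\");\n"
      let ret := pvA_dfLoop dashboard_filter ret
      ret ++ "        $('#fourthdd_div').show();\n" ++ "      }\n"
    else ret) ret

def pvA_secLoop (user_dic : List (String × List (String × List (String × List (String × Int))))) (dashboard_filter : List (String × List (String × List (String × List (String × Int))))) (ret : String) : String :=
  user_dic.foldl (fun ret sp =>
    let ret := ret ++ ("    if ( second == \"" ++ sp.1 ++ "\" ) {\n")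
    let ret := if sp.1 == "HDF-Cloud" then ret ++ "      checkboxes_jlab();\n" else ret
    let ret := pvA_thirdLoop sp.2 dashboard_filter ret
    ret ++ "    }\n") ret

def onchange_dd3 (user_dic : List (String × List (String × List (String × List (String × Int))))) (dashboard_filter : List (String × List (String × List (String × List (String × Int))))) : String :=
  pvA_secLoop user_dic dashboard_filter
    ("" ++ "function onChangeDD3() {\n"
        ++ "  var first = $('#firstdd').val();\n"
        ++ "  var dash = $('#dashboarddd').val();\n"
        ++ "  var second = $('#seconddd').val();\n"
        ++ "  var value = $('#thirddd').val();\n"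
        ++ "  $('#third_input').val(value);\n"
        ++ "  $('#thirddd').html(value + ' <span class=\\\"caret\\\"></span>');\n")
    ++ "}\n"

-- ===== PORT B =====
-- B's single pass over dashboard_filter, collecting the invariant block as a list of parts
def pvParts (dashboard_filter : List (String × List (String × List (String × List (String × Int))))) : List String :=
  dashboard_filter.foldl (fun parts dp =>
    dp.2.foldl (fun parts sp =>
      sp.2.foldl (fun parts ap =>
        let keys := PySem.List.sorted (ap.2.map Prod.fst) (fun s => PySem.Str.lower s) false
        if keys.length > 0 then
          parts ++ ("        if ( dash == \"" ++ dp.1 ++ "\" && second == \"" ++ sp.1 ++ "\" && value == \"" ++ ap.1 ++ "\"){\n")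
            :: (keys.map (fun project => "          $(\"#fourthdd_ul\").append('<li><a href=\"#\" onclick=\"onClickDD4(\\'" ++ project ++ "\\')\" id=\"fourthdd_" ++ project ++ "\">" ++ project ++ "</a></li>');\n")
            ++ ["          $(\"#fourthdd\").val(\"" ++ PySem.List.pyGetD keys 0 "" ++ "\").trigger(\"change\");\n", "        }\n"])
        else parts) parts) parts) []

-- B's user_dic loop, appending precomputed `inner` in each branch
def pvB_thirdLoop (rest2 : List (String × List (String × List (String × Int)))) (inner : String) (out : List String) : List String :=
  rest2.foldl (fun out tp =>
    if tp.2.length > 0 then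
      out ++ [("      if ( value == \"" ++ tp.1 ++ "\" ) {\n"),
              "        $(\"#fourthdd_ul\").html(\"\");\n",
              inner,
              "        $('#fourthdd_div').show();\n",
              "      }\n"]
    else out) out

def pvB_secLoop (user_dic : List (String × List (String × List (String × List (String × Int))))) (inner : String) (out : List String) : List String :=
  user_dic.foldl (fun out sp =>
    let out := out ++ [("    if ( second == \"" ++ sp.1 ++ "\" ) {\n")]
    let out := if sp.1 == "HDF-Cloud" then out ++ ["      checkboxes_jlab();\n"] else out
    let out := pvB_thirdLoop sp.2 inner out
    out ++ ["    }\n"]) out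

def onchange_dd3_alt (user_dic : List (String × List (String × List (String × List (String × Int))))) (dashboard_filter : List (String × List (String × List (String × List (String × Int))))) : String :=
  PySem.Str.join ""
    (pvB_secLoop user_dic (PySem.Str.join "" (pvParts dashboard_filter))
      ["function onChangeDD3() {\n",
       "  var first = $('#firstdd').val();\n",
       "  var dash = $('#dashboarddd').val();\n",
       "  var second = $('#seconddd').val();\n",
       "  var value = $('#thirddd').val();\n",
       "  $('#third_input').val(value);\n",
       "  $('#thirddd').html(value + ' <span class=\\\"caret\\\"></span>');\n"]
     ++ ["}\n"])

-- ===== PRECONDITION & SPEC =====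
def Spec_onchange_dd3 (user_dic : List (String × List (String × List (String × List (String × Int))))) (dashboard_filter : List (String × List (String × List (String × List (String × Int))))) (out : String) : Prop := out = onchange_dd3_alt user_dic dashboard_filter
instance (user_dic : List (String × List (String × List (String × List (String × Int))))) (dashboard_filter : List (String × List (String × List (String × List (String × Int))))) (out : String) : Decidable (Spec_onchange_dd3 user_dic dashboard_filter out) := by unfold Spec_onchange_dd3; infer_instance

-- ===== CLAIM (what is proved, stated in full; the proofs are below) =====
def Claim_equal_onchange_dd3 : Prop := ∀ (user_dic : List (String × List (String × List (String × List (String × Int))))) (dashboard_filter : List (String × List (String × List (String × List (String × Int))))), Dom_onchange_dd3 user_dic dashboard_filter → Spec_onchange_dd3 user_dic dashboard_filter (onchange_dd3 user_dic dashboard_filter)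

-- ===== LEMMAS AND PROOFS =====

-- ''.join basics
lemma pvJoinNil : PySem.Str.join "" ([] : List String) = "" := rfl

lemma pvJoinCons (x : String) (xs : List String) :
    PySem.Str.join "" (x :: xs) = x ++ PySem.Str.join "" xs := by
  have h : ∀ (a : List Char) (l : List (List Char)),
      ([] : List Char).intercalate (a :: l) = a ++ ([] : List Char).intercalate l := by
    intro a l; cases l <;> simp [List.intercalate]
  simp [PySem.Str.join, PySem.Chars.join, h]

lemma pvJoinAppend (a b : List String) :
    PySem.Str.join "" (a ++ b) = PySem.Str.join "" a ++ PySem.Str.join "" b := by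
  induction a with
  | nil => simp [pvJoinNil]
  | cons x t ih => simp [pvJoinCons, ih, String.append_assoc]

lemma pvJoinFlatMap {α : Type} (f : α → List String) (l : List α) :
    PySem.Str.join "" (l.flatMap f) = PySem.Str.join "" (l.map (fun x => PySem.Str.join "" (f x))) := by
  induction l with
  | nil => rfl
  | cons x t ih => simp only [List.flatMap_cons, List.map_cons, pvJoinAppend, pvJoinCons, ih]

-- a foldl whose step only appends a per-element string factors through the accumulator
lemma pvFoldlPull {α : Type} (step : String → α → String) (g : α → String)
    (h : ∀ (s : String) (x : α), step s x = s ++ g x) :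
    ∀ (l : List α) (s : String), l.foldl step s = s ++ PySem.Str.join "" (l.map g) := by
  intro l; induction l with
  | nil => intro s; simp [pvJoinNil]
  | cons x t ih => intro s
                   simp only [List.foldl_cons, List.map_cons, pvJoinCons]
                   rw [h, ih, String.append_assoc]

-- the list analogue, for B's part-collecting folds
lemma pvFoldlPullL {α β : Type} (step : List β → α → List β) (g : α → List β)
    (h : ∀ (s : List β) (x : α), step s x = s ++ g x) :
    ∀ (l : List α) (s : List β), l.foldl step s = s ++ l.flatMap g := by
  intro l; induction l with
  | nil => intro s; simp
  | cons x t ih => intro s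
                   simp only [List.foldl_cons, List.flatMap_cons]
                   rw [h, ih, List.append_assoc]

-- the block B emits for one account entry
def pvBlock (dashboard system : String) (ap : String × List (String × Int)) : List String :=
  let keys := PySem.List.sorted (ap.2.map Prod.fst) (fun s => PySem.Str.lower s) false
  if keys.length > 0 then
    ("        if ( dash == \"" ++ dashboard ++ "\" && second == \"" ++ system ++ "\" && value == \"" ++ ap.1 ++ "\"){\n")
      :: (keys.map (fun project => "          $(\"#fourthdd_ul\").append('<li><a href=\"#\" onclick=\"onClickDD4(\\'" ++ project ++ "\\')\" id=\"fourthdd_" ++ project ++ "\">" ++ project ++ "</a></li>');\n")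
      ++ ["          $(\"#fourthdd\").val(\"" ++ PySem.List.pyGetD keys 0 "" ++ "\").trigger(\"change\");\n", "        }\n"])
  else []

lemma pvA_accLoop_eq (v2 : List (String × List (String × Int))) (d s ret : String) :
    pvA_accLoop v2 d s ret = ret ++ PySem.Str.join "" (v2.flatMap (pvBlock d s)) := by
  rw [pvJoinFlatMap]
  unfold pvA_accLoop
  apply pvFoldlPull
  intro acc ap
  by_cases hlen : ap.2.length > 0
  · have hk : (PySem.List.sorted (ap.2.map Prod.fst) (fun s => PySem.Str.lower s) false).length > 0 := by
      rw [PySem.List.length_sorted]; simpa using hlen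
    simp only [pvBlock, hlen, if_pos, hk]
    rw [pvFoldlPull _ (fun project => "          $(\"#fourthdd_ul\").append('<li><a href=\"#\" onclick=\"onClickDD4(\\'" ++ project ++ "\\')\" id=\"fourthdd_" ++ project ++ "\">" ++ project ++ "</a></li>');\n") (fun _ _ => rfl)]
    simp [pvJoinCons, pvJoinAppend, pvJoinNil, ← String.append_assoc, String.append_empty]
  · simp [pvBlock, hlen, pvJoinNil]

lemma pvParts_eq (df : List (String × List (String × List (String × List (String × Int))))) :
    pvParts df = df.flatMap (fun dp => dp.2.flatMap (fun sp => sp.2.flatMap (pvBlock dp.1 sp.1))) := by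
  unfold pvParts
  rw [pvFoldlPullL _ (fun dp => dp.2.flatMap (fun sp => sp.2.flatMap (pvBlock dp.1 sp.1)))]
  · simp
  · intro s dp
    rw [pvFoldlPullL _ (fun sp => sp.2.flatMap (pvBlock dp.1 sp.1))]
    intro s' sp
    rw [pvFoldlPullL _ (pvBlock dp.1 sp.1)]
    intro s'' ap
    by_cases hlen : 0 < ap.2.length <;> simp [pvBlock, hlen]

lemma pvA_dfLoop_eq (df : List (String × List (String × List (String × List (String × Int))))) (ret : String) :
    pvA_dfLoop df ret = ret ++ PySem.Str.join "" (pvParts df) := by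
  rw [pvParts_eq, pvJoinFlatMap]
  unfold pvA_dfLoop
  apply pvFoldlPull
  intro acc dp
  rw [pvJoinFlatMap]
  apply pvFoldlPull
  intro acc' sp
  rw [pvA_accLoop_eq]

-- what one (third, rest3) entry contributes, as B's part list
def pvThirdParts (inner : String) (tp : String × List (String × List (String × Int))) : List String :=
  if tp.2.length > 0 then
    [("      if ( value == \"" ++ tp.1 ++ "\" ) {\n"),
     "        $(\"#fourthdd_ul\").html(\"\");\n",
     inner,
     "        $('#fourthdd_div').show();\n",
     "      }\n"]
  else []

lemma pvB_thirdLoop_eq (rest2 : List (String × List (String × List (String × Int)))) (inner : String) (out : List String) :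
    pvB_thirdLoop rest2 inner out = out ++ rest2.flatMap (pvThirdParts inner) := by
  unfold pvB_thirdLoop
  apply pvFoldlPullL
  intro s tp
  by_cases hlen : tp.2.length > 0 <;> simp [pvThirdParts, hlen]

lemma pvA_thirdLoop_eq (rest2 : List (String × List (String × List (String × Int)))) (df : List (String × List (String × List (String × List (String × Int))))) (ret : String) :
    pvA_thirdLoop rest2 df ret
      = ret ++ PySem.Str.join "" (rest2.flatMap (pvThirdParts (PySem.Str.join "" (pvParts df)))) := by
  rw [pvJoinFlatMap]
  unfold pvA_thirdLoop
  apply pvFoldlPull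
  intro acc tp
  by_cases hlen : tp.2.length > 0
  · simp only [pvThirdParts, hlen, if_pos]
    simp only [pvA_dfLoop_eq]
    simp [pvJoinCons, pvJoinNil, ← String.append_assoc, String.append_empty]
    rw [String.append_assoc]
    simp
  · simp [pvThirdParts, hlen, pvJoinNil]

-- what one (second, rest2) entry contributes, as B's part list
def pvSecParts (inner : String) (sp : String × List (String × List (String × List (String × Int)))) : List String :=
  ("    if ( second == \"" ++ sp.1 ++ "\" ) {\n")
    :: ((if sp.1 == "HDF-Cloud" then ["      checkboxes_jlab();\n"] else [])
    ++ sp.2.flatMap (pvThirdParts inner) ++ ["    }\n"])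

lemma pvB_secLoop_eq (u : List (String × List (String × List (String × List (String × Int))))) (inner : String) (out : List String) :
    pvB_secLoop u inner out = out ++ u.flatMap (pvSecParts inner) := by
  unfold pvB_secLoop
  apply pvFoldlPullL
  intro s sp
  simp only [pvB_thirdLoop_eq]
  by_cases hc : sp.1 == "HDF-Cloud" <;> simp [pvSecParts, hc, List.append_assoc]

lemma pvA_secLoop_eq (u : List (String × List (String × List (String × List (String × Int))))) (df : List (String × List (String × List (String × List (String × Int))))) (ret : String) :
    pvA_secLoop u df ret
      = ret ++ PySem.Str.join "" (u.flatMap (pvSecParts (PySem.Str.join "" (pvParts df)))) := by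
  rw [pvJoinFlatMap]
  unfold pvA_secLoop
  apply pvFoldlPull
  intro s sp
  simp only [pvA_thirdLoop_eq]
  by_cases hc : sp.1 == "HDF-Cloud" <;>
    simp [pvSecParts, hc, pvJoinCons, pvJoinAppend, pvJoinNil, pvJoinFlatMap, ← String.append_assoc, String.append_empty]

-- ===== VERDICT (by name: the statement is the Claim_ definition above) =====
theorem onchange_dd3_spec : Claim_equal_onchange_dd3 := by
  intro u df _
  unfold Spec_onchange_dd3 onchange_dd3 onchange_dd3_alt
  rw [pvA_secLoop_eq, pvB_secLoop_eq]
  simp [pvJoinAppend, pvJoinCons, pvJoinNil, ← String.append_assoc, String.append_empty]
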